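-- pv_equiv track=rewrite | github.com/ODurcain/CS470 | Assignment 2/programming_assignment2_completed.py | anagram_expand
-- ===== SOURCE A (Python) =====
-- def anagram_expand(state, goal):
--     node_list = []
--
--     # Converts state and goal to lists. Program wasn't runnign without this
--     state = list(state)
--     goal = list(goal)
--
--     # Calculate the heuristic as the number of misplaced& correctly placed characters
--     # Lowwest solution is closer to the goal
--     score = sum(1 for a, b in zip(state, goal) if a != b)
--     score += sum(1 for a, b in zip(state, goal) if a == b)
--
--     for pos in range(1, len(state)):
--         new_state = state[1:pos + 1] + [state[0]] + state[pos + 1:]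
--         new_state_str = ''.join(new_state)
--         node_list.append((new_state_str, score)) # new append to fix error
--         # node_list.append((new_state, score)) # this was throwing an error
--
--     return node_list
-- ===== SOURCE B (Python) =====
-- def anagram_expand(state, goal):
--     # score = number of zipped positions (mismatches + matches) = min of the lengths
--     score = min(len(state), len(goal))
--     node_list = []
--     cur = list(state)
--     for pos in range(1, len(cur)):
--         # bubble the original first character one step right by an adjacent swap
--         cur[pos - 1], cur[pos] = cur[pos], cur[pos - 1]
--         node_list.append((''.join(cur), score))
--     return node_list
-- ===== Notes on version B (the rewrite author's own statement) =====
-- stated objective: simpler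
-- what changed: The two zip-counting passes are replaced by the closed form min(len(state), len(goal)), and each neighbor string is produced by one in-place adjacent swap on a running list instead of recomputing three slice concatenations per position.
import Mathlib
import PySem

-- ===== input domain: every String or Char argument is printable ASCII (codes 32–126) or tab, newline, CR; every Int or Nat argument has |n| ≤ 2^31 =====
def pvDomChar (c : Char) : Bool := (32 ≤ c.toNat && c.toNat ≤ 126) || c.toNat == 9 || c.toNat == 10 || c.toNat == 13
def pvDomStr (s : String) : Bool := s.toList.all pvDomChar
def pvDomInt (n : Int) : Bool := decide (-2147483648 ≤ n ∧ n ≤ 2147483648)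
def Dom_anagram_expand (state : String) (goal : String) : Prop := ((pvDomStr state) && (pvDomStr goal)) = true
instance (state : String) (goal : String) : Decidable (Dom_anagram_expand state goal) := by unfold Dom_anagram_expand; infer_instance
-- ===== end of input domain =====

-- B replaces A's two zip-counting passes by the closed form min(len state, len goal) and builds each
-- neighbor by one in-place adjacent swap on a running list instead of three slice concatenations (simpler).

-- ===== PORT A =====
-- state[0] inside the loop: the loop runs only when pos ≥ 1, so the list is nonempty and the
-- pyGetD default is never used (index 0 is in range).
def anagram_expand (state : String) (goal : String) : List (String × Int) :=
  let s := state.toList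
  let g := goal.toList
  let score : Int :=
    (s.zip g).foldl (fun acc p => if p.1 ≠ p.2 then acc + 1 else acc) 0
      + (s.zip g).foldl (fun acc p => if p.1 = p.2 then acc + 1 else acc) 0
  (PySem.List.pyRange 1 (s.length : Int) 1).foldl
    (fun acc pos =>
      acc ++ [(String.ofList (PySem.List.slice s (some 1) (some (pos + 1))
                          ++ [PySem.List.pyGetD s 0 ' ']
                          ++ PySem.List.slice s (some (pos + 1)) none), score)]) []

-- ===== PORT B =====
def anagram_expand_alt (state : String) (goal : String) : List (String × Int) :=
  let score : Int := min (state.toList.length : Int) (goal.toList.length : Int)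
  let res := (PySem.List.pyRange 1 (state.toList.length : Int) 1).foldl
    (fun (st : List Char × List (String × Int)) pos =>
      let cur' := PySem.List.pySetD
                    (PySem.List.pySetD st.1 (pos - 1) (PySem.List.pyGetD st.1 pos ' '))
                    pos (PySem.List.pyGetD st.1 (pos - 1) ' ')
      (cur', st.2 ++ [(String.ofList cur', score)]))
    (state.toList, [])
  res.2

-- ===== PRECONDITION & SPEC =====
def Spec_anagram_expand (state : String) (goal : String) (out : List (String × Int)) : Prop := out = anagram_expand_alt state goal
instance (state : String) (goal : String) (out : List (String × Int)) : Decidable (Spec_anagram_expand state goal out) := by unfold Spec_anagram_expand; infer_instance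

-- ===== CLAIM (what is proved, stated in full; the proofs are below) =====
def Claim_equal_anagram_expand : Prop := ∀ (state : String) (goal : String), Dom_anagram_expand state goal → Spec_anagram_expand state goal (anagram_expand state goal)

-- ===== LEMMAS AND PROOFS =====

-- the state after bubbling the first char to position p
def pvRot (s : List Char) (p : Nat) : List Char :=
  (s.drop 1).take p ++ s.take 1 ++ s.drop (p + 1)

theorem pvRot_zero (s : List Char) : pvRot s 0 = s := by
  cases s <;> simp [pvRot]

theorem pvRot_cons (c : Char) (t : List Char) (q : Nat) :
    pvRot (c :: t) q = t.take q ++ c :: t.drop q := by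
  simp [pvRot]

theorem pvGetD_mid (A B : List Char) (c x d : Char) :
    (A ++ c :: x :: B).getD A.length d = c := by
  induction A with
  | nil => rfl
  | cons a t ih => simp [List.getD]

theorem pvGetD_mid' (A B : List Char) (c x d : Char) :
    (A ++ c :: x :: B).getD (A.length + 1) d = x := by
  induction A with
  | nil => rfl
  | cons a t ih => simp [List.getD]

theorem pvSet_swap_mid (A B : List Char) (c x : Char) :
    ((A ++ c :: x :: B).set A.length x).set (A.length + 1) c = A ++ x :: c :: B := by
  induction A with
  | nil => rfl
  | cons a t ih => simp

theorem pvRot_as_mid (s : List Char) (q : Nat) (h : q + 1 < s.length) :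
    ∃ A B c x, pvRot s q = A ++ c :: x :: B ∧ A.length = q ∧
      pvRot s (q + 1) = A ++ x :: c :: B := by
  match s, h with
  | c :: t, h =>
    have hq : q < t.length := by simpa using h
    refine ⟨t.take q, t.drop (q + 1), c, t[q], ?_, by simp [Nat.le_of_lt hq], ?_⟩
    · rw [pvRot_cons, List.drop_eq_getElem_cons hq]
    · have ht : t.take (q + 1) = t.take q ++ [t[q]] := by
        rw [List.take_add_one, List.getElem?_eq_getElem hq]
        rfl
      rw [pvRot_cons, ht, List.append_assoc, List.singleton_append]

-- one loop step of B's fold turns pvRot s q into pvRot s (q+1)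
theorem pvSwap_step (s : List Char) (q : Nat) (h : q + 1 < s.length) :
    PySem.List.pySetD
      (PySem.List.pySetD (pvRot s q) ((q : Int) + 1 - 1)
        (PySem.List.pyGetD (pvRot s q) ((q : Int) + 1) ' '))
      ((q : Int) + 1) (PySem.List.pyGetD (pvRot s q) ((q : Int) + 1 - 1) ' ')
    = pvRot s (q + 1) := by
  obtain ⟨A, B, c, x, h1, h2, h3⟩ := pvRot_as_mid s q h
  have e1 : ((q : Int) + 1 - 1) = ((q : Nat) : Int) := by omega
  have e2 : ((q : Int) + 1) = (((q + 1 : Nat)) : Int) := by omega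
  rw [e1, e2, h1, h3]
  simp only [PySem.List.pySetD_natCast, PySem.List.pyGetD_natCast]
  rw [← h2, pvGetD_mid A B c x ' ', pvGetD_mid' A B c x ' ', pvSet_swap_mid]

-- B's loop invariant: folding from position q+1 (the current list being pvRot s q) appends
-- exactly the neighbors pvRot s (q+1), pvRot s (q+2), …
theorem pvB_inv (s : List Char) (sc : Int) (k : Nat) :
    ∀ (q : Nat) (acc : List (String × Int)), q + 1 + k = s.length →
    ((PySem.List.pyRange ((q : Int) + 1) (s.length : Int) 1).foldl
      (fun (st : List Char × List (String × Int)) pos =>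
        let cur' := PySem.List.pySetD
                      (PySem.List.pySetD st.1 (pos - 1) (PySem.List.pyGetD st.1 pos ' '))
                      pos (PySem.List.pyGetD st.1 (pos - 1) ' ')
        (cur', st.2 ++ [(String.ofList cur', sc)]))
      (pvRot s q, acc)).2
    = acc ++ (List.range k).map (fun j => (String.ofList (pvRot s (q + 1 + j)), sc)) := by
  induction k with
  | zero =>
    intro q acc h
    rw [PySem.List.pyRange_one_eq_nil (by omega)]
    simp
  | succ k ih =>
    intro q acc h
    rw [PySem.List.pyRange_one_cons (by omega)]
    simp only [List.foldl_cons]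
    have hq : q + 1 < s.length := by omega
    have hih := ih (q + 1) (acc ++ [(String.ofList (pvRot s (q + 1)), sc)]) (by omega)
    rw [pvSwap_step s q hq,
      show ((q : Int) + 1 + 1) = (((q + 1 : Nat) : Int) + 1) by push_cast; ring]
    rw [hih, List.range_succ_eq_map]
    simp only [List.map_cons, List.map_map, List.append_assoc, List.cons_append,
      List.nil_append, Nat.add_zero]
    congr 1
    congr 1
    apply List.map_congr_left
    intro a _
    simp only [Function.comp, Nat.succ_eq_add_one]
    rw [show q + 1 + 1 + a = q + 1 + (a + 1) from by omega]

-- counting over the zip with any predicate and its negation sums to the length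
theorem pvCount_aux (l : List (Char × Char)) :
    ∀ (a b : Int),
    l.foldl (fun acc p => if p.1 ≠ p.2 then acc + 1 else acc) a
      + l.foldl (fun acc p => if p.1 = p.2 then acc + 1 else acc) b
    = a + b + l.length := by
  induction l with
  | nil => intro a b; simp
  | cons x t ih =>
    intro a b
    by_cases h : x.1 = x.2 <;> simp only [List.foldl_cons, h, if_true, if_false,
      ne_eq, not_true_eq_false, not_false_eq_true, List.length_cons] <;>
      rw [ih] <;> push_cast <;> ring

-- A's score is the number of zipped positions, i.e. the min of the two lengths
theorem pvA_score (s g : List Char) :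
    (s.zip g).foldl (fun acc p => if p.1 ≠ p.2 then acc + 1 else acc) (0 : Int)
      + (s.zip g).foldl (fun acc p => if p.1 = p.2 then acc + 1 else acc) (0 : Int)
    = min (s.length : Int) (g.length : Int) := by
  rw [pvCount_aux (s.zip g) 0 0, List.length_zip]
  push_cast
  omega

theorem pvHead_take (s : List Char) (h : s ≠ []) :
    [PySem.List.pyGetD s 0 ' '] = s.take 1 := by
  cases s with
  | nil => exact absurd rfl h
  | cons c t => simp [PySem.List.pyGetD_zero_cons]

-- ===== VERDICT (by name: the statement is the Claim_ definition above) =====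
theorem anagram_expand_spec : Claim_equal_anagram_expand := by
  intro state goal _
  unfold Spec_anagram_expand anagram_expand anagram_expand_alt
  simp only [PySem.List.foldl_append_singleton_eq_map, List.nil_append]
  by_cases hs : state.toList = []
  · rw [hs]
    simp [PySem.List.pyRange_one_eq_nil]
  · set s := state.toList with hdef
    set g := goal.toList
    have hlen : 1 ≤ s.length := List.length_pos_iff.mpr hs
    -- B side via the loop invariant
    have hB := pvB_inv s (min (s.length : Int) (g.length : Int)) (s.length - 1) 0 [] (by omega)
    rw [pvRot_zero] at hB
    rw [show (((0 : Nat) : Int) + 1) = (1 : Int) by norm_num] at hB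
    rw [hB, List.nil_append]
    -- A side: turn the range into List.range and compare elementwise
    rw [PySem.List.pyRange_one 1 (s.length : Int), List.map_map,
      show ((s.length : Int) - 1).toNat = s.length - 1 by omega]
    apply List.map_congr_left
    intro k hk
    have hk' : k + 1 < s.length := by
      have := List.mem_range.mp hk
      omega
    simp only [Function.comp]
    rw [pvA_score s g]
    rw [show ((1 : Int) + (k : Int) + 1) = (((k + 2 : Nat)) : Int) by omega,
      show (1 : Int) = (((1 : Nat)) : Int) by norm_num,
      PySem.List.slice_natCast, PySem.List.slice_from_natCast,
      pvHead_take s hs]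
    congr 2
    · simp only [pvRot]
      rw [show k + 2 - 1 = k + 1 from by omega, show (0 : Nat) + 1 + k = k + 1 from by omega,
        show k + 1 + 1 = k + 2 from by omega]
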